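-- pv_equiv track=rewrite | github.com/tlian25/kickstart_2022 | session_1/milktea/milktea_solution2.py | buildScores
-- ===== SOURCE A (Python) =====
-- def buildScores(teas):
--
--     # scores[i] = [#of0s, #of1s] at i-th position across all teas
--     scores = [[0, 0] for _ in range(len(teas[0]))]
--
--     for i in range(len(scores)):
--         for t in teas:
--             if t[i] == '0':
--                 scores[i][0] += 1
--             else:
--                 scores[i][1] += 1
--
--     return scores
-- ===== SOURCE B (Python) =====
-- def buildScores(teas):
--     n = len(teas[0])
--
--     def solve(ts):
--         # divide and conquer: score vector of a single tea, merged by elementwise addition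
--         if len(ts) == 1:
--             return [[1, 0] if ts[0][j] == '0' else [0, 1] for j in range(n)]
--         mid = len(ts) // 2
--         return [[a0 + b0, a1 + b1]
--                 for (a0, a1), (b0, b1) in zip(solve(ts[:mid]), solve(ts[mid:]))]
--
--     return solve(teas)
-- ===== Notes on version B (the rewrite author's own statement) =====
-- stated objective: alternative
-- what changed: Replaces A's in-place mutation of a preallocated table via nested index loops with a divide-and-conquer recursion: a single tea maps to its unit score vector and halves are merged by elementwise addition of score pairs.
-- outside the precondition, e.g. on buildScores([]): A raises IndexError, B raises IndexError; on buildScores(['01', '0']): A raises IndexError, B raises IndexError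
import Mathlib
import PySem

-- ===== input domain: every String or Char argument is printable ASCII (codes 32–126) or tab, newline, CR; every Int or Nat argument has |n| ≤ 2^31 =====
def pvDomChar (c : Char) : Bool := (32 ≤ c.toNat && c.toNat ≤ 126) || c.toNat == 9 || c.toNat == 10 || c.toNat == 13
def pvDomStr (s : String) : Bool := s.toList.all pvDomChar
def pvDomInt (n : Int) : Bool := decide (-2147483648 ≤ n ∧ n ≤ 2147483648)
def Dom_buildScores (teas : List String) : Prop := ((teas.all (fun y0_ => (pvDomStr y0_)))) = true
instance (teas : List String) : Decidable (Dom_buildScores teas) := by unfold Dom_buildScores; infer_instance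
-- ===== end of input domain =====

-- B replaces A's in-place mutation of a preallocated table (nested index loops) by a
-- divide-and-conquer recursion merging per-half score vectors by elementwise addition;
-- equivalence is proved on Pre_ (where A raises no IndexError).

-- ===== PORT A =====
def buildScores (teas : List String) : List (List Int) :=
  -- scores = [[0, 0] for _ in range(len(teas[0]))]
  let scores := (List.range ((PySem.List.pyGetD teas 0 "").toList.length)).map
    (fun _ => ([0, 0] : List Int))
  -- for i in range(len(scores)): for t in teas: …
  (List.range scores.length).foldl
    (fun sc (i : Nat) =>
      teas.foldl
        (fun sc t =>
          if PySem.Str.pyGet? t (i : Int) = some '0' then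
            sc.modify i (fun row => row.modify 0 (· + 1))   -- scores[i][0] += 1
          else
            sc.modify i (fun row => row.modify 1 (· + 1)))  -- scores[i][1] += 1
        sc)
    scores

-- ===== PORT B =====
-- port of B's inner 'solve', recursion on the half-lists; the extra fuel argument
-- (called with fuel = len(ts), always sufficient) only makes the recursion structural,
-- and the [] / fuel-0 branches are unreachable under Pre_
def pvSolve (n : Nat) (fuel : Nat) (ts : List String) : List (List Int) :=
  match fuel, ts with
  | _, [] => []
  | _, [t] => (List.range n).map
      (fun (j : Nat) => if PySem.Str.pyGet? t (j : Int) = some '0' then ([1, 0] : List Int) else [0, 1])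
  | 0, _ :: _ :: _ => []
  | fuel + 1, t1 :: t2 :: rest =>
      -- mid = len(ts) // 2
      List.zipWith
        (fun a b =>
          match a, b with
          | [a0, a1], [b0, b1] => [a0 + b0, a1 + b1]
          | _, _ => [])
        (pvSolve n fuel ((t1 :: t2 :: rest).take ((t1 :: t2 :: rest).length / 2)))
        (pvSolve n fuel ((t1 :: t2 :: rest).drop ((t1 :: t2 :: rest).length / 2)))

def buildScores_alt (teas : List String) : List (List Int) :=
  let n := (PySem.List.pyGetD teas 0 "").toList.length   -- n = len(teas[0])
  pvSolve n teas.length teas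

-- ===== PRECONDITION & SPEC =====
-- Pre_ excludes exactly the inputs where A raises IndexError: empty teas (teas[0]) and
-- a tea shorter than teas[0] (t[i]); B raises IndexError on the same inputs.
def Pre_buildScores (teas : List String) : Prop :=
  teas ≠ [] ∧ ∀ t ∈ teas, (PySem.List.pyGetD teas 0 "").toList.length ≤ t.toList.length
instance (teas : List String) : Decidable (Pre_buildScores teas) := by
  unfold Pre_buildScores; infer_instance
def pvWitness_buildScores : List String := (["01x", "100"])

def Spec_buildScores (teas : List String) (out : List (List Int)) : Prop := out = buildScores_alt teas
instance (teas : List String) (out : List (List Int)) : Decidable (Spec_buildScores teas out) := by unfold Spec_buildScores; infer_instance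

-- ===== CLAIM (what is proved, stated in full; the proofs are below) =====
def Claim_equal_buildScores : Prop := ∀ (teas : List String), Dom_buildScores teas → Pre_buildScores teas → Spec_buildScores teas (buildScores teas)

-- ===== LEMMAS AND PROOFS =====

-- "t has '0' at position j", the test both programs count
def pvHas0 (j : Nat) (t : String) : Bool := t.toList[j]? == some '0'

-- what one tea does to row i of A's table
def pvRowStep (i : Nat) (row : List Int) (t : String) : List Int :=
  if t.toList[i]? = some '0' then row.modify 0 (· + 1) else row.modify 1 (· + 1)

theorem pv_modify_modify {β : Type} (l : List β) (i : Nat) (f g : β → β) :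
    (l.modify i f).modify i g = l.modify i (fun x => g (f x)) := by
  apply List.ext_getElem <;> simp [List.getElem_modify]
  intro j h1 h2; split <;> simp_all

-- A's inner loop over teas only touches row i
theorem pv_inner_fold (teas : List String) (i : Nat) (sc : List (List Int)) :
    teas.foldl
      (fun sc t =>
        if PySem.Str.pyGet? t (i : Int) = some '0' then
          sc.modify i (fun row => row.modify 0 (· + 1))
        else
          sc.modify i (fun row => row.modify 1 (· + 1)))
      sc
    = sc.modify i (fun r => teas.foldl (pvRowStep i) r) := by
  induction teas generalizing sc with
  | nil => exact (List.modify_id i sc).symm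
  | cons t ts ih =>
    rw [List.foldl_cons]
    by_cases h : PySem.Str.pyGet? t (i : Int) = some '0'
    · rw [if_pos h, ih, pv_modify_modify]
      have h' : t.toList[i]? = some '0' := by simpa using h
      congr 1; funext r; simp [pvRowStep, h']
    · rw [if_neg h, ih, pv_modify_modify]
      have h' : ¬ t.toList[i]? = some '0' := by simpa using h
      congr 1; funext r; simp [pvRowStep, h']

-- folding pvRowStep from [a, b] counts '0's and non-'0's at position i
theorem pv_row_fold (i : Nat) (teas : List String) (a b : Int) :
    teas.foldl (pvRowStep i) [a, b]
      = [a + (teas.countP (pvHas0 i) : Int),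
         b + (teas.countP (fun t => !(pvHas0 i t)) : Int)] := by
  induction teas generalizing a b with
  | nil => simp
  | cons t ts ih =>
    rw [List.foldl_cons]
    by_cases h : t.toList[i]? = some '0'
    · have hp : pvHas0 i t = true := by simp [pvHas0, h]
      have : pvRowStep i [a, b] t = [a + 1, b] := by simp [pvRowStep, h, List.modify]
      rw [this, ih]
      simp [hp]; omega
    · have hp : pvHas0 i t = false := by simp [pvHas0, h]
      have : pvRowStep i [a, b] t = [a, b + 1] := by simp [pvRowStep, h, List.modify]
      rw [this, ih]
      simp [hp]; omega

-- modifying each index of range k once, starting from a constant table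
theorem pv_outer_fold {β : Type} (g : Nat → β → β) (v : β) (n : Nat) :
    ∀ k, k ≤ n →
    (List.range k).foldl (fun sc i => sc.modify i (g i)) (List.replicate n v)
      = (List.range n).map (fun j => if j < k then g j v else v) := by
  intro k
  induction k with
  | zero => intro _; simp [List.map_const']
  | succ k ih =>
    intro hk
    rw [List.range_succ, List.foldl_append, ih (by omega)]
    simp only [List.foldl_cons, List.foldl_nil]
    apply List.ext_getElem
    · simp
    · intro j hj1 hj2
      simp only [List.getElem_modify, List.getElem_map, List.getElem_range]
      by_cases hkj : k = j
      · subst hkj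
        rw [if_pos rfl, if_neg (lt_irrefl k), if_pos (by omega)]
      · rw [if_neg hkj]
        by_cases hjk : j < k
        · rw [if_pos hjk, if_pos (by omega)]
        · rw [if_neg hjk, if_neg (by omega)]

-- A's value in closed form
theorem pv_A_closed (teas : List String) :
    buildScores teas
      = (List.range ((PySem.List.pyGetD teas 0 "").toList.length)).map
          (fun j => [(teas.countP (pvHas0 j) : Int),
                     (teas.countP (fun t => !(pvHas0 j t)) : Int)]) := by
  unfold buildScores
  simp only [List.length_map, List.length_range]
  rw [show (List.range ((PySem.List.pyGetD teas 0 "").toList.length)).map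
        (fun _ => ([0, 0] : List Int))
      = List.replicate ((PySem.List.pyGetD teas 0 "").toList.length) [0, 0] from by
    simp [List.map_const']]
  simp only [pv_inner_fold]
  rw [pv_outer_fold (fun i r => teas.foldl (pvRowStep i) r) ([0, 0] : List Int)
    ((PySem.List.pyGetD teas 0 "").toList.length)
    ((PySem.List.pyGetD teas 0 "").toList.length) le_rfl]
  apply List.map_congr_left
  intro j hj
  rw [List.mem_range] at hj
  rw [if_pos hj, pv_row_fold]
  simp

-- B's single-tea base case
theorem pv_solve_single (n : Nat) (fuel : Nat) (t : String) :
    pvSolve n fuel [t]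
      = (List.range n).map
          (fun j => [(List.countP (pvHas0 j) [t] : Int),
                     (List.countP (fun t => !(pvHas0 j t)) [t] : Int)]) := by
  rw [show pvSolve n fuel [t] = (List.range n).map
      (fun (j : Nat) => if PySem.Str.pyGet? t (j : Int) = some '0' then ([1, 0] : List Int) else [0, 1])
    from by cases fuel <;> rfl]
  apply List.map_congr_left
  intro j hj
  by_cases h : PySem.Str.pyGet? t (j : Int) = some '0'
  · have h' : pvHas0 j t = true := by simp [pvHas0]; simpa using h
    simp [h']
    simpa using h
  · have h' : pvHas0 j t = false := by simp [pvHas0]; intro hc; exact h (by simpa using hc)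
    simp [h']
    simpa using h

-- B's solve in closed form, by induction on the fuel
theorem pv_solve_closed (n : Nat) :
    ∀ (fuel : Nat) (ts : List String), ts.length ≤ fuel → ts ≠ [] →
    pvSolve n fuel ts
      = (List.range n).map
          (fun j => [(ts.countP (pvHas0 j) : Int),
                     (ts.countP (fun t => !(pvHas0 j t)) : Int)]) := by
  intro fuel
  induction fuel with
  | zero =>
    intro ts hle hne
    interval_cases h : ts.length
    · exact absurd (List.length_eq_zero_iff.mp h) hne
  | succ f ih =>
    intro ts hle hne
    match ts with
    | [t] => exact pv_solve_single n (f + 1) t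
    | t1 :: t2 :: rest =>
      have h2 : 2 ≤ (t1 :: t2 :: rest).length := by simp
      have hpos : 1 ≤ (t1 :: t2 :: rest).length / 2 := by omega
      have hlt : (t1 :: t2 :: rest).length / 2 < (t1 :: t2 :: rest).length := by omega
      have htake : ((t1 :: t2 :: rest).take ((t1 :: t2 :: rest).length / 2)).length
          = (t1 :: t2 :: rest).length / 2 := by simp; omega
      have hdrop : ((t1 :: t2 :: rest).drop ((t1 :: t2 :: rest).length / 2)).length
          = (t1 :: t2 :: rest).length - (t1 :: t2 :: rest).length / 2 := by simp
      have hL := ih ((t1 :: t2 :: rest).take ((t1 :: t2 :: rest).length / 2))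
        (by rw [htake]; omega)
        (by intro hc; rw [hc] at htake; simp at htake; omega)
      have hR := ih ((t1 :: t2 :: rest).drop ((t1 :: t2 :: rest).length / 2))
        (by rw [hdrop]; omega)
        (by intro hc; rw [hc] at hdrop; simp at hdrop; omega)
      show List.zipWith _ _ _ = _
      rw [hL, hR, List.zipWith_map_left, List.zipWith_map_right, List.zipWith_self]
      apply List.map_congr_left
      intro j hj
      have hcnt0 : (t1 :: t2 :: rest).countP (pvHas0 j)
          = ((t1 :: t2 :: rest).take ((t1 :: t2 :: rest).length / 2)).countP (pvHas0 j)
            + ((t1 :: t2 :: rest).drop ((t1 :: t2 :: rest).length / 2)).countP (pvHas0 j) := by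
        conv_lhs => rw [← List.take_append_drop ((t1 :: t2 :: rest).length / 2) (t1 :: t2 :: rest)]
        rw [List.countP_append]
      have hcnt1 : (t1 :: t2 :: rest).countP (fun t => !(pvHas0 j t))
          = ((t1 :: t2 :: rest).take ((t1 :: t2 :: rest).length / 2)).countP (fun t => !(pvHas0 j t))
            + ((t1 :: t2 :: rest).drop ((t1 :: t2 :: rest).length / 2)).countP (fun t => !(pvHas0 j t)) := by
        conv_lhs => rw [← List.take_append_drop ((t1 :: t2 :: rest).length / 2) (t1 :: t2 :: rest)]
        rw [List.countP_append]
      simp [hcnt0, hcnt1]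

theorem pv_main (teas : List String) (hpre : Pre_buildScores teas) :
    buildScores teas = buildScores_alt teas := by
  obtain ⟨hne, _⟩ := hpre
  rw [pv_A_closed]
  unfold buildScores_alt
  rw [pv_solve_closed _ teas.length teas le_rfl hne]
-- ===== VERDICT (by name: the statement is the Claim_ definition above) =====
theorem buildScores_spec : Claim_equal_buildScores := by
  intro teas _ hpre
  unfold Spec_buildScores
  exact pv_main teas hpre
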